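-- pv_equiv track=rewrite | github.com/kasiopea-org/pisek | pisek/update_config.py | get_subtask_mask
-- ===== SOURCE A (Python) =====
-- from itertools import product
--
-- def get_subtask_mask(points, subtasks):
--     all_valid = [0] * len(subtasks)
--
--     valid = 0
--     for comb in product([0, 1], repeat=len(subtasks)):
--         p = sum([comb[i] * subtasks[i] for i in range(len(subtasks))])
--         if p == points:
--             valid += 1
--             for i in range(len(subtasks)):
--                 all_valid[i] += comb[i]
--
--     if valid == 0:
--         return "X" * len(subtasks)
--
--     sub_mask = ""
--     for x in all_valid:
--         if x == valid:
--             sub_mask += "1"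
--         elif x == 0:
--             sub_mask += "0"
--         else:
--             sub_mask += "X"
--     return sub_mask
-- ===== SOURCE B (Python) =====
-- def get_subtask_mask(points, subtasks):
--     # One structural recursion computing, for the remaining suffix, both the
--     # number of subsets hitting the target and, per element, the number of
--     # hitting subsets containing it -- no explicit enumeration of bit tuples.
--     def stats(p, xs):
--         if not xs:
--             return (1 if p == 0 else 0, [])
--         v0, c0 = stats(p, xs[1:])
--         v1, c1 = stats(p - xs[0], xs[1:])
--         return (v0 + v1, [v1] + [a + b for a, b in zip(c0, c1)])
--
--     valid, counts = stats(points, subtasks)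
--     if valid == 0:
--         return "X" * len(subtasks)
--     return "".join(
--         "1" if c == valid else "0" if c == 0 else "X" for c in counts
--     )
-- ===== Notes on version B (the rewrite author's own statement) =====
-- stated objective: alternative
-- what changed: A enumerates all 2^n bit tuples with itertools.product and accumulates per-index sums imperatively; B computes the hit count and all per-element inclusion counts in a single structural recursion over the list (stats(p, x::rest) combines stats(p, rest) and stats(p-x, rest)), never materialising the tuples.
import Mathlib
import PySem

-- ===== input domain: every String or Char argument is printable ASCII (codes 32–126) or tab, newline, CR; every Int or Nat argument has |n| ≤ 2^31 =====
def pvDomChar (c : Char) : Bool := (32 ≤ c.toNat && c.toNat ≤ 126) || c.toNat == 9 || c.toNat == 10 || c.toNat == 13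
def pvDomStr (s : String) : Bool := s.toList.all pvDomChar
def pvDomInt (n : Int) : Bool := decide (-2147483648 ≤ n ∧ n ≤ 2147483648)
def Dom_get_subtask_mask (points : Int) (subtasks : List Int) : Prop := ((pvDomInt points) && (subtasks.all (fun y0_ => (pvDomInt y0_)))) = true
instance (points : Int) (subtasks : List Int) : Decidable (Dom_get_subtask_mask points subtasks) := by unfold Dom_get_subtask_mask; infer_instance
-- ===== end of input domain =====

-- B replaces A's explicit enumeration of all 2^n bit tuples by one structural
-- recursion computing the hit count and per-element inclusion counts together
-- (objective: alternative decomposition, same exponential cost).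

-- ===== PORT A =====
-- itertools.product([0, 1], repeat=n), in Python's order (first coordinate slowest)
def pyProdBits : Nat → List (List Int)
  | 0 => [[]]
  | n + 1 => ((pyProdBits n).map (fun c => 0 :: c)) ++ ((pyProdBits n).map (fun c => 1 :: c))

def get_subtask_mask (points : Int) (subtasks : List Int) : String :=
  let n := subtasks.length
  let res := (pyProdBits n).foldl
    (fun (st : List Int × Int) comb =>
      let p := ((List.range n).map
        (fun (i : Nat) => PySem.List.pyGetD comb (i : Int) 0 * PySem.List.pyGetD subtasks (i : Int) 0)).sum
      if p = points then
        ((List.range n).foldl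
          (fun av i => av.set i (PySem.List.pyGetD av (i : Int) 0 + PySem.List.pyGetD comb (i : Int) 0)) st.1,
         st.2 + 1)
      else st)
    (List.replicate n 0, 0)
  if res.2 = 0 then String.ofList (List.replicate n 'X')
  else res.1.foldl (fun s x => s ++ (if x = res.2 then "1" else if x = 0 then "0" else "X")) ""

-- ===== PORT B =====
-- stats(p, xs): (number of subsets of xs summing to p, per-element counts of subsets containing it)
def statsB (p : Int) : List Int → Int × List Int
  | [] => (if p = 0 then 1 else 0, [])
  | x :: rest =>
    let r0 := statsB p rest
    let r1 := statsB (p - x) rest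
    (r0.1 + r1.1, r1.1 :: List.zipWith (· + ·) r0.2 r1.2)

def get_subtask_mask_alt (points : Int) (subtasks : List Int) : String :=
  let r := statsB points subtasks
  if r.1 = 0 then String.ofList (List.replicate subtasks.length 'X')
  else String.join (r.2.map (fun c => if c = r.1 then "1" else if c = 0 then "0" else "X"))

-- ===== PRECONDITION & SPEC =====
def Spec_get_subtask_mask (points : Int) (subtasks : List Int) (out : String) : Prop := out = get_subtask_mask_alt points subtasks
instance (points : Int) (subtasks : List Int) (out : String) : Decidable (Spec_get_subtask_mask points subtasks out) := by unfold Spec_get_subtask_mask; infer_instance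

-- ===== CLAIM (what is proved, stated in full; the proofs are below) =====
def Claim_equal_get_subtask_mask : Prop := ∀ (points : Int) (subtasks : List Int), Dom_get_subtask_mask points subtasks → Spec_get_subtask_mask points subtasks (get_subtask_mask points subtasks)

-- ===== LEMMAS AND PROOFS =====
def dotP (c xs : List Int) : Int := (List.zipWith (fun a b => a * b) c xs).sum
def vadd (a b : List Int) : List Int := List.zipWith (· + ·) a b

lemma vaddP_assoc : ∀ (a b c : List Int), vadd (vadd a b) c = vadd a (vadd b c) := by
  intro a
  induction a with
  | nil => intro b c; simp [vadd]
  | cons x t ih =>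
    intro b c
    cases b with
    | nil => simp [vadd]
    | cons y bt =>
      cases c with
      | nil => simp [vadd]
      | cons z ct => simpa [vadd, Int.add_assoc] using ih bt ct

lemma vaddP_zero_left : ∀ (s : List Int), vadd (List.replicate s.length 0) s = s := by
  intro s
  induction s with
  | nil => rfl
  | cons x t ih => simpa [vadd, List.replicate_succ] using ih

lemma vaddP_length (a b : List Int) : (vadd a b).length = min a.length b.length := by
  simp [vadd]

lemma range_dot (xs : List Int) : ∀ (c : List Int), c.length = xs.length →
    ((List.range xs.length).map
      (fun (i : Nat) => PySem.List.pyGetD c (i : Int) 0 * PySem.List.pyGetD xs (i : Int) 0)).sum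
      = dotP c xs := by
  induction xs with
  | nil => intro c hc; simp [dotP, List.length_eq_zero_iff.mp hc]
  | cons x t ih =>
    intro c hc
    cases c with
    | nil => simp at hc
    | cons c0 ct =>
      simp only [List.length_cons] at hc
      simp only [List.length_cons]
      rw [List.range_succ_eq_map]
      simp only [List.map_cons, List.map_map, List.sum_cons]
      have := ih ct (by omega)
      simp only [PySem.List.pyGetD_natCast] at this ⊢
      simp only [Function.comp_def]
      have h2 : ∀ (i : Nat), (c0 :: ct).getD (i+1) 0 * (x :: t).getD (i+1) 0 = ct.getD i 0 * t.getD i 0 := by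
        intro i; simp
      calc (c0 :: ct).getD 0 0 * (x :: t).getD 0 0 +
            ((List.range t.length).map fun i => (c0 :: ct).getD (i+1) 0 * (x :: t).getD (i+1) 0).sum
          = c0 * x + ((List.range t.length).map fun i => ct.getD i 0 * t.getD i 0).sum := by
            simp
        _ = dotP (c0 :: ct) (x :: t) := by
            rw [this]; simp [dotP]

lemma addInto_shift (c0 : Int) (cs : List Int) : ∀ (l : List Nat) (h : Int) (t : List Int),
    l.foldl (fun av i => av.set (i + 1) (av.getD (i + 1) 0 + (c0 :: cs).getD (i + 1) 0)) (h :: t)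
      = h :: l.foldl (fun av i => av.set i (av.getD i 0 + cs.getD i 0)) t := by
  intro l
  induction l with
  | nil => intro h t; rfl
  | cons i l ih =>
    intro h t
    simp only [List.foldl_cons, List.getD_cons_succ, List.set_cons_succ]
    exact ih h _

lemma addInto_eq : ∀ (c av : List Int), av.length = c.length →
    (List.range av.length).foldl (fun av i => av.set i (av.getD i 0 + c.getD i 0)) av
      = vadd av c := by
  intro c
  induction c with
  | nil => intro av h; simp [List.length_eq_zero_iff.mp h, vadd]
  | cons c0 ct ih =>
    intro av h
    cases av with
    | nil => simp at h
    | cons a at' =>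
      simp only [List.length_cons] at h
      rw [List.length_cons, List.range_succ_eq_map, List.foldl_cons]
      simp only [List.getD_cons_zero, List.set_cons_zero]
      rw [List.foldl_map]
      rw [addInto_shift]
      rw [ih at' (by omega)]
      simp [vadd]

lemma addInto_eq' (c av : List Int) (h : av.length = c.length) :
    (List.range av.length).foldl
      (fun av (i : Nat) => av.set i (PySem.List.pyGetD av (i : Int) 0 + PySem.List.pyGetD c (i : Int) 0)) av
      = vadd av c := by
  have := addInto_eq c av h
  simpa [PySem.List.pyGetD_natCast] using this

lemma mem_pyProdBits_length : ∀ (n : Nat) (c : List Int), c ∈ pyProdBits n → c.length = n := by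
  intro n
  induction n with
  | zero => intro c hc; simp [pyProdBits] at hc; simp [hc]
  | succ m ih =>
    intro c hc
    simp only [pyProdBits, List.mem_append, List.mem_map] at hc
    rcases hc with ⟨d, hd, rfl⟩ | ⟨d, hd, rfl⟩ <;> simp [ih d hd]

lemma statsB_len (p : Int) : ∀ (xs : List Int), (statsB p xs).2.length = xs.length := by
  intro xs
  induction xs generalizing p with
  | nil => simp [statsB]
  | cons x t ih => simp [statsB, ih]

lemma consfold (b : Int) : ∀ (L : List (List Int)) (h : Int) (t : List Int),
    (L.map (fun c => b :: c)).foldl (fun a c => vadd a c) (h :: t)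
      = (h + b * L.length) :: L.foldl (fun a c => vadd a c) t := by
  intro L
  induction L with
  | nil => intro h t; simp [vadd]
  | cons c L ih =>
    intro h t
    simp only [List.map_cons, List.foldl_cons]
    have : vadd (h :: t) (b :: c) = (h + b) :: vadd t c := by simp [vadd]
    rw [this, ih]
    congr 1
    simp only [List.length_cons]
    push_cast
    ring

lemma str_fold_join (g : Int → String) : ∀ (L : List Int) (s : String),
    L.foldl (fun s x => s ++ g x) s = s ++ String.join (L.map g) := by
  intro L
  induction L with
  | nil => intro s; simp [String.join]
  | cons x t ih =>
    intro s
    simp only [List.foldl_cons, List.map_cons]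
    rw [ih]
    simp only [String.join]
    rw [List.foldl_cons]
    have assoc : ∀ (a b c : String), a ++ b ++ c = a ++ (b ++ c) := fun a b c => String.append_assoc
    have gen : ∀ (M : List String) (u v : String), M.foldl (· ++ ·) (u ++ v) = u ++ M.foldl (· ++ ·) v := by
      intro M
      induction M with
      | nil => intro u v; rfl
      | cons m M ihm => intro u v; simp only [List.foldl_cons, assoc]; exact ihm u (v ++ m)
    have h1 : (List.map g t).foldl (· ++ ·) ("" ++ g x) = g x ++ (List.map g t).foldl (· ++ ·) "" := by
      have := gen (List.map g t) (g x) ""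
      simpa using this
    rw [h1, ← assoc]

lemma addInto_eq2 (c av : List Int) (n : Nat) (h1 : av.length = n) (h2 : c.length = n) :
    (List.range n).foldl
      (fun av (i : Nat) => av.set i (PySem.List.pyGetD av (i : Int) 0 + PySem.List.pyGetD c (i : Int) 0)) av
      = vadd av c := by
  subst h1
  exact addInto_eq' c av (by omega)

lemma foldA (points : Int) (subtasks : List Int) :
    ∀ (L : List (List Int)) (av : List Int) (v : Int),
      (∀ c ∈ L, c.length = subtasks.length) → av.length = subtasks.length →
      L.foldl
        (fun (st : List Int × Int) comb =>
          let p := ((List.range subtasks.length).map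
            (fun (i : Nat) => PySem.List.pyGetD comb (i : Int) 0 * PySem.List.pyGetD subtasks (i : Int) 0)).sum
          if p = points then
            ((List.range subtasks.length).foldl
              (fun av (i : Nat) => av.set i (PySem.List.pyGetD av (i : Int) 0 + PySem.List.pyGetD comb (i : Int) 0)) st.1,
             st.2 + 1)
          else st)
        (av, v)
      = ((L.filter (fun c => decide (dotP c subtasks = points))).foldl (fun a c => vadd a c) av,
         v + ((L.filter (fun c => decide (dotP c subtasks = points))).length : Int)) := by
  intro L
  induction L with
  | nil => intro av v _ _; simp
  | cons comb L ih =>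
    intro av v hlen hav
    have hc : comb.length = subtasks.length := hlen comb (by simp)
    simp only [List.foldl_cons, List.filter_cons]
    rw [range_dot subtasks comb hc]
    by_cases hp : dotP comb subtasks = points
    · rw [if_pos hp, if_pos (by simp [hp])]
      rw [addInto_eq2 comb av subtasks.length hav hc]
      rw [ih (vadd av comb) (v + 1) (fun c h => hlen c (by simp [h]))
            (by rw [vaddP_length]; omega)]
      rw [List.foldl_cons]
      simp only [Prod.mk.injEq]
      refine ⟨trivial, ?_⟩
      · simp only [List.length_cons]
        push_cast
        ring
    · rw [if_neg hp, if_neg (by simp [hp])]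
      exact ih av v (fun c h => hlen c (by simp [h])) hav

lemma main_stats : ∀ (xs : List Int) (p : Int),
    (((pyProdBits xs.length).filter (fun c => decide (dotP c xs = p))).length : Int) = (statsB p xs).1
    ∧ ∀ (init : List Int), init.length = xs.length →
        ((pyProdBits xs.length).filter (fun c => decide (dotP c xs = p))).foldl (fun a c => vadd a c) init
          = vadd init (statsB p xs).2 := by
  intro xs
  induction xs with
  | nil =>
    intro p
    constructor
    · by_cases hp : p = 0 <;> simp [pyProdBits, dotP, statsB, hp, eq_comm]
    · intro init h
      have : init = [] := List.length_eq_zero_iff.mp h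
      subst this
      by_cases hp : p = 0 <;> simp [pyProdBits, dotP, statsB, hp, vadd, eq_comm]
  | cons x t ih =>
    intro p
    have e0 : ∀ c : List Int, (decide (dotP (0 :: c) (x :: t) = p)) = decide (dotP c t = p) := by
      intro c; simp [dotP]
    have e1 : ∀ c : List Int, (decide (dotP (1 :: c) (x :: t) = p)) = decide (dotP c t = p - x) := by
      intro c
      apply decide_eq_decide.mpr
      simp only [dotP, List.zipWith_cons_cons, List.sum_cons, one_mul]
      omega
    have hsplit : (pyProdBits (x :: t).length).filter (fun c => decide (dotP c (x :: t) = p))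
        = ((pyProdBits t.length).filter (fun c => decide (dotP c t = p))).map (fun c => 0 :: c)
          ++ ((pyProdBits t.length).filter (fun c => decide (dotP c t = p - x))).map (fun c => 1 :: c) := by
      simp only [List.length_cons, pyProdBits, List.filter_append, List.filter_map, Function.comp_def]
      congr 1
      · exact congrArg _ (List.filter_congr (fun c _ => e0 c))
      · exact congrArg _ (List.filter_congr (fun c _ => e1 c))
    rw [hsplit]
    obtain ⟨ih0a, ih0b⟩ := ih p
    obtain ⟨ih1a, ih1b⟩ := ih (p - x)
    constructor
    · simp only [List.length_append, List.length_map, statsB]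
      push_cast
      rw [ih0a, ih1a]
    · intro init hinit
      cases init with
      | nil => simp at hinit
      | cons i0 it =>
        simp only [List.length_cons] at hinit
        have hit : it.length = t.length := by omega
        rw [List.foldl_append]
        rw [consfold 0 _ i0 it, consfold 1 _ (i0 + 0 * _) _]
        rw [ih0b it hit]
        rw [ih1b (vadd it (statsB p t).2) (by rw [vaddP_length, statsB_len]; omega)]
        simp only [statsB, zero_mul, add_zero, one_mul, vadd, List.zipWith_cons_cons]
        rw [← ih1a]
        congr 1
        exact vaddP_assoc it _ _

lemma ports_agree (points : Int) (subtasks : List Int) :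
    get_subtask_mask points subtasks = get_subtask_mask_alt points subtasks := by
  simp only [get_subtask_mask, get_subtask_mask_alt]
  rw [foldA points subtasks (pyProdBits subtasks.length) (List.replicate subtasks.length 0) 0
        (mem_pyProdBits_length subtasks.length) (List.length_replicate)]
  obtain ⟨h1, h2⟩ := main_stats subtasks points
  rw [h2 (List.replicate subtasks.length 0) List.length_replicate]
  have hz : vadd (List.replicate subtasks.length 0) (statsB points subtasks).2
      = (statsB points subtasks).2 := by
    rw [← statsB_len points subtasks]
    exact vaddP_zero_left _
  rw [hz]
  rw [zero_add, h1]
  by_cases h0 : (statsB points subtasks).1 = 0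
  · simp [h0]
  · rw [if_neg h0, if_neg h0]
    rw [str_fold_join (fun x => if x = (statsB points subtasks).1 then "1" else if x = 0 then "0" else "X")]
    simp

-- ===== VERDICT (by name: the statement is the Claim_ definition above) =====
theorem get_subtask_mask_spec : Claim_equal_get_subtask_mask := by
  intro points subtasks _
  unfold Spec_get_subtask_mask
  exact ports_agree points subtasks
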